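-- pv_equiv track=rewrite | github.com/Tobitob999/ARS | tinycrawl_demo.py | bfs_next_step
-- ===== SOURCE A (Python) =====
-- from collections import deque
-- from typing import Optional, List, Tuple, Dict
--
-- def bfs_next_step(
--     start: Tuple[int, int],
--     goal:  Tuple[int, int],
--     blocked: set,
--     w: int,
--     h: int,
-- ) -> Optional[Tuple[int, int]]:
--     """Return the first step on the shortest path from start to goal."""
--     if start == goal:
--         return None
--     queue: deque = deque([start])
--     visited: dict = {start: None}
--     while queue:
--         pos = queue.popleft()
--         for dx, dy in ((0, -1), (0, 1), (-1, 0), (1, 0)):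
--             npos = (pos[0] + dx, pos[1] + dy)
--             if npos in visited:
--                 continue
--             if not (0 <= npos[0] < w and 0 <= npos[1] < h):
--                 continue
--             if npos in blocked:
--                 continue
--             visited[npos] = pos
--             if npos == goal:
--                 step = npos
--                 while visited[step] != start:
--                     step = visited[step]
--                 return step
--             queue.append(npos)
--     return None
-- ===== SOURCE B (Python) =====
-- from collections import deque
--
--
-- def bfs_next_step(start, goal, blocked, w, h):
--     """Same BFS order, but each queued cell carries the FIRST step taken from
--     start (no parent dict, no backward reconstruction), and each popped cell's
--     acceptable neighbors are computed in one filtered batch (the 4 neighbors of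
--     a cell are pairwise distinct, so batching cannot change visited checks)."""
--     if start == goal:
--         return None
--     visited = {start}
--     queue = deque([(start, None)])
--     while queue:
--         pos, first = queue.popleft()
--         fresh = [npos
--                  for npos in ((pos[0], pos[1] - 1), (pos[0], pos[1] + 1),
--                               (pos[0] - 1, pos[1]), (pos[0] + 1, pos[1]))
--                  if npos not in visited
--                  and 0 <= npos[0] < w and 0 <= npos[1] < h
--                  and npos not in blocked]
--         if goal in fresh:
--             return first if first is not None else goal
--         visited.update(fresh)
--         queue.extend((npos, first if first is not None else npos) for npos in fresh)
--     return None
-- ===== Notes on version B (the rewrite author's own statement) =====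
-- stated objective: simpler
-- what changed: B drops A's parent dict and backward reconstruction loop: each queued cell carries the first step taken from start, and each popped cell's admissible neighbors are computed as one filtered batch (valid since a cell's 4 neighbors are pairwise distinct) followed by a single goal-membership test, batch visited.update and queue.extend.
import Mathlib
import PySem

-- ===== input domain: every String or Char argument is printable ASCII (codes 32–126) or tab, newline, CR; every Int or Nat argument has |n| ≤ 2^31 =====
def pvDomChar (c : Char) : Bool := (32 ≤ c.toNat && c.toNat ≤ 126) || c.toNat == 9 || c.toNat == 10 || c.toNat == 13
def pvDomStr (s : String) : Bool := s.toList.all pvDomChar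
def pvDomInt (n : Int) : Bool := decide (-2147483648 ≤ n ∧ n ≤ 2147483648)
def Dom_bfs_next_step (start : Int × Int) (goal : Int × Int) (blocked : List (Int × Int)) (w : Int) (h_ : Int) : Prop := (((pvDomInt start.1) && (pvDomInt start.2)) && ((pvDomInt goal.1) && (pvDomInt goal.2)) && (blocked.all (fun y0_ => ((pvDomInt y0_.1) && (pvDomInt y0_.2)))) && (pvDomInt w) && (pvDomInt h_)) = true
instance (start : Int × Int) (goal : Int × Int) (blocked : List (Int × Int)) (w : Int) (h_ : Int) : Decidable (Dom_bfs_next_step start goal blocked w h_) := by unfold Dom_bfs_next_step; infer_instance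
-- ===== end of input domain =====

-- B drops A's parent dict and backward reconstruction: each queued cell carries the first
-- step taken from start, and each popped cell's admissible neighbors are computed as one
-- filtered batch (sound since a cell's four neighbors are pairwise distinct).

-- ===== PORT A =====
-- neighbor offsets, A's order
def pvDirs : List (Int × Int) := [(0, -1), (0, 1), (-1, 0), (1, 0)]

-- A's reconstruction loop 'step = npos; while visited[step] != start: step = visited[step]'.
-- Fuel = number of dict keys, which always suffices (the parent chain visits distinct keys);
-- 'none' marks the unreachable fuel-out / KeyError states.
def pvWalkA (d : PySem.Dict (Int × Int) (Option (Int × Int))) (start : Int × Int) :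
    Nat → (Int × Int) → Option (Int × Int)
  | 0, _ => none
  | n + 1, step =>
    match d.get? step with
    | none => none                      -- KeyError (unreachable in a real run)
    | some v =>
      if v = some start then some step
      else
        match v with
        | some q => pvWalkA d start n q
        | none => none                  -- next lookup would be visited[None]: KeyError

-- A's inner 'for dx, dy in …' with continue/early-return, threading (queue, visited)
def pvTryA (goal : Int × Int) (blocked : List (Int × Int)) (w h_ : Int)
    (start pos : Int × Int) :
    List (Int × Int) → List (Int × Int) → PySem.Dict (Int × Int) (Option (Int × Int)) →
    Sum (Option (Int × Int)) (List (Int × Int) × PySem.Dict (Int × Int) (Option (Int × Int)))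
  | [], q, d => .inr (q, d)
  | (dx, dy) :: rest, q, d =>
    let npos : Int × Int := (pos.1 + dx, pos.2 + dy)
    if d.contains npos then pvTryA goal blocked w h_ start pos rest q d
    else if ¬ (0 ≤ npos.1 ∧ npos.1 < w ∧ 0 ≤ npos.2 ∧ npos.2 < h_) then
      pvTryA goal blocked w h_ start pos rest q d
    else if npos ∈ blocked then pvTryA goal blocked w h_ start pos rest q d
    else
      let d' := d.insert npos (some pos)
      if npos = goal then .inl (pvWalkA d' start d'.size npos)
      else pvTryA goal blocked w h_ start pos rest (q ++ [npos]) d'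

-- A's 'while queue:' loop. Fuel w*h+2 bounds the pops: every enqueued cell is a fresh
-- in-grid visited key, so pops ≤ w*h + 1 and the fuel is never exhausted.
def pvLoopA (goal : Int × Int) (blocked : List (Int × Int)) (w h_ : Int) (start : Int × Int) :
    Nat → List (Int × Int) → PySem.Dict (Int × Int) (Option (Int × Int)) → Option (Int × Int)
  | 0, _, _ => none
  | _ + 1, [], _ => none
  | n + 1, pos :: qs, d =>
    match pvTryA goal blocked w h_ start pos pvDirs qs d with
    | .inl r => r
    | .inr (q', d') => pvLoopA goal blocked w h_ start n q' d'

def bfs_next_step (start : Int × Int) (goal : Int × Int) (blocked : List (Int × Int)) (w : Int) (h_ : Int) : Option (Int × Int) :=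
  if start = goal then none
  else pvLoopA goal blocked w h_ start (w.toNat * h_.toNat + 2) [start]
    (PySem.Dict.empty.insert start none)

-- ===== PORT B =====
-- the four neighbors of a cell, written out as in Source B's comprehension
def pvNbrs (pos : Int × Int) : List (Int × Int) :=
  [(pos.1, pos.2 - 1), (pos.1, pos.2 + 1), (pos.1 - 1, pos.2), (pos.1 + 1, pos.2)]

-- Source B's comprehension condition
def pvKeep (vis : PySem.Set (Int × Int)) (blocked : List (Int × Int)) (w h_ : Int)
    (npos : Int × Int) : Bool :=
  !(PySem.Set.contains vis npos)
    && decide (0 ≤ npos.1 ∧ npos.1 < w ∧ 0 ≤ npos.2 ∧ npos.2 < h_)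
    && !(decide (npos ∈ blocked))

-- Source B's 'while queue:' — queue of (cell, first step), visited a plain set
def pvLoopB (goal : Int × Int) (blocked : List (Int × Int)) (w h_ : Int) :
    Nat → List ((Int × Int) × Option (Int × Int)) → PySem.Set (Int × Int) → Option (Int × Int)
  | 0, _, _ => none
  | _ + 1, [], _ => none
  | n + 1, (pos, first) :: rest, vis =>
    let fresh := (pvNbrs pos).filter (pvKeep vis blocked w h_)
    if goal ∈ fresh then some (first.getD goal)
    else pvLoopB goal blocked w h_ n
      (rest ++ fresh.map (fun np => (np, some (first.getD np))))
      (PySem.Set.update vis fresh)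

def bfs_next_step_alt (start : Int × Int) (goal : Int × Int) (blocked : List (Int × Int)) (w : Int) (h_ : Int) : Option (Int × Int) :=
  if start = goal then none
  else pvLoopB goal blocked w h_ (w.toNat * h_.toNat + 2) [(start, none)]
    (PySem.Set.ofList [start])

-- ===== PRECONDITION & SPEC =====
-- A is total (it returns on every input), so Pre_ excludes nothing; it is stated only so a
-- concrete solvable witness grid accompanies the claim.
def Pre_bfs_next_step (start : Int × Int) (goal : Int × Int) (blocked : List (Int × Int)) (w : Int) (h_ : Int) : Prop := True
instance (start : Int × Int) (goal : Int × Int) (blocked : List (Int × Int)) (w : Int) (h_ : Int) : Decidable (Pre_bfs_next_step start goal blocked w h_) := by unfold Pre_bfs_next_step; infer_instance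
def pvWitness_bfs_next_step : (Int × Int) × (Int × Int) × (List (Int × Int)) × Int × Int := ((0, 0), (2, 1), [(1, 0)], 3, 2)
def Spec_bfs_next_step (start : Int × Int) (goal : Int × Int) (blocked : List (Int × Int)) (w : Int) (h_ : Int) (out : Option (Int × Int)) : Prop := out = bfs_next_step_alt start goal blocked w h_
instance (start : Int × Int) (goal : Int × Int) (blocked : List (Int × Int)) (w : Int) (h_ : Int) (out : Option (Int × Int)) : Decidable (Spec_bfs_next_step start goal blocked w h_ out) := by unfold Spec_bfs_next_step; infer_instance

-- ===== CLAIM (what is proved, stated in full; the proofs are below) =====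
def Claim_equal_bfs_next_step : Prop := ∀ (start : Int × Int) (goal : Int × Int) (blocked : List (Int × Int)) (w : Int) (h_ : Int), Dom_bfs_next_step start goal blocked w h_ → Pre_bfs_next_step start goal blocked w h_ → Spec_bfs_next_step start goal blocked w h_ (bfs_next_step start goal blocked w h_)

-- ===== LEMMAS AND PROOFS =====

-- fuel monotonicity of the back-walk
theorem pvWalkA_mono (d : PySem.Dict (Int × Int) (Option (Int × Int))) (start : Int × Int) :
    ∀ {n m : Nat} {p : Int × Int} {f : Int × Int}, pvWalkA d start n p = some f → n ≤ m →
      pvWalkA d start m p = some f := by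
  intro n
  induction n with
  | zero => intro m p f h; simp [pvWalkA] at h
  | succ k ih =>
    intro m p f h hnm
    obtain ⟨m', rfl⟩ : ∃ m', m = m' + 1 := ⟨m - 1, by omega⟩
    rw [pvWalkA] at h ⊢
    cases hg : d.get? p with
    | none => rw [hg] at h; simp at h
    | some v =>
      rw [hg] at h
      by_cases hv : v = some start
      · simpa [hv] using h
      · cases v with
        | none => simp [hv] at h
        | some q =>
          simp only [hv, if_false] at h ⊢
          exact ih h (by omega)

-- the back-walk is unchanged by inserting a fresh key
theorem pvWalkA_insert (d : PySem.Dict (Int × Int) (Option (Int × Int))) (start : Int × Int)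
    (k : Int × Int) (v : Option (Int × Int)) (hk : d.contains k = false) :
    ∀ {n : Nat} {p : Int × Int} {f : Int × Int}, pvWalkA d start n p = some f →
      pvWalkA (d.insert k v) start n p = some f := by
  intro n
  induction n with
  | zero => intro p f h; simp [pvWalkA] at h
  | succ m ih =>
    intro p f h
    rw [pvWalkA] at h ⊢
    cases hg : d.get? p with
    | none => rw [hg] at h; simp at h
    | some w =>
      rw [hg] at h
      have hpk : p ≠ k := by
        intro he
        rw [he] at hg
        have h0 : d.get? k = none := by simp [PySem.Dict.get?_eq_none_iff_contains, hk]
        rw [h0] at hg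
        simp at hg
      rw [PySem.Dict.get?_insert_of_ne _ _ hpk, hg]
      by_cases hv : w = some start
      · simpa [hv] using h
      · cases w with
        | none => simp [hv] at h
        | some q =>
          simp only [hv, if_false] at h ⊢
          exact ih h

-- 'f is the first step recorded for p': p is start (f = none), or A's back-walk from p returns f
def pvFS (start : Int × Int) (d : PySem.Dict (Int × Int) (Option (Int × Int)))
    (p : Int × Int) (f : Option (Int × Int)) : Prop :=
  (p = start ∧ f = none) ∨
  (p ≠ start ∧ ∃ g, f = some g ∧ pvWalkA d start d.size p = some g)

-- contains is unchanged by inserting a different key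
theorem pvContains_insert_ne (d : PySem.Dict (Int × Int) (Option (Int × Int)))
    (k a : Int × Int) (v : Option (Int × Int)) (h : a ≠ k) :
    (d.insert k v).contains a = d.contains a := by
  simp [PySem.Dict.contains_eq_decide_mem_keys, PySem.Dict.mem_keys_insert, h]

-- pvFS is preserved by inserting a fresh key
theorem pvFS_insert (start : Int × Int) (d : PySem.Dict (Int × Int) (Option (Int × Int)))
    (k : Int × Int) (v : Option (Int × Int)) (hk : d.contains k = false)
    {p : Int × Int} {f : Option (Int × Int)} (h : pvFS start d p f) :
    pvFS start (d.insert k v) p f := by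
  rcases h with h | ⟨hp, g, rfl, hw⟩
  · exact Or.inl h
  · refine Or.inr ⟨hp, g, rfl, ?_⟩
    have h1 := pvWalkA_insert d start k v hk hw
    have hsz : (d.insert k v).size = d.size + 1 := by
      simp [PySem.Dict.size_insert, hk]
    rw [hsz]
    exact pvWalkA_mono _ _ h1 (Nat.le_succ _)

-- the freshly inserted cell's back-walk returns exactly B's first-step value
theorem pvWalkA_new (start pos npos : Int × Int)
    (d : PySem.Dict (Int × Int) (Option (Int × Int))) (hk : d.contains npos = false)
    {first : Option (Int × Int)} (hFS : pvFS start d pos first) :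
    pvWalkA (d.insert npos (some pos)) start (d.insert npos (some pos)).size npos
      = some (first.getD npos) := by
  have hsz : (d.insert npos (some pos)).size = d.size + 1 := by
    simp [PySem.Dict.size_insert, hk]
  rw [hsz, pvWalkA, PySem.Dict.get?_insert_self]
  rcases hFS with ⟨rfl, rfl⟩ | ⟨hp, g, hf, hw⟩
  · simp
  · subst hf
    have : ¬ (some pos = some start) := by simpa using hp
    simp only [this, if_false, Option.getD_some]
    exact pvWalkA_insert d start npos (some pos) hk hw

-- A's batch of insertions for one popped cell
def pvIns (pos : Int × Int) (d : PySem.Dict (Int × Int) (Option (Int × Int)))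
    (fr : List (Int × Int)) : PySem.Dict (Int × Int) (Option (Int × Int)) :=
  fr.foldl (fun dd np => dd.insert np (some pos)) d

theorem pvKeys_pvIns (pos : Int × Int) :
    ∀ (fr : List (Int × Int)) (d : PySem.Dict (Int × Int) (Option (Int × Int))),
      fr.Nodup → (∀ np ∈ fr, d.contains np = false) →
      (pvIns pos d fr).keys = PySem.Set.update d.keys fr := by
  intro fr
  induction fr with
  | nil => intro d _ _; rfl
  | cons np rest ih =>
    intro d hnd hfresh
    have hk : d.contains np = false := hfresh np (List.mem_cons_self ..)
    have hnp : np ∉ d.keys := by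
      intro hm; simp [← PySem.Dict.contains_iff_mem_keys, hk] at hm
    have hstep : pvIns pos d (np :: rest) = pvIns pos (d.insert np (some pos)) rest := rfl
    have hupd : PySem.Set.update d.keys (np :: rest)
        = PySem.Set.update (PySem.Set.add d.keys np) rest := rfl
    rw [hstep, hupd]
    have hadd : PySem.Set.add d.keys np = d.keys ++ [np] := by
      simp [PySem.Set.add, PySem.Set.contains, hnp]
    have hkeys : (d.insert np (some pos)).keys = d.keys ++ [np] :=
      PySem.Dict.keys_insert_of_not_contains _ _ hk
    rw [ih (d.insert np (some pos)) hnd.of_cons ?_, hkeys, hadd]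
    intro a ha
    have hne : a ≠ np := by
      intro he; subst he; exact (List.nodup_cons.mp hnd).1 ha
    rw [pvContains_insert_ne _ _ _ _ hne]
    exact hfresh a (List.mem_cons_of_mem _ ha)

-- membership survives Set.update
theorem pvMem_update (x : Int × Int) :
    ∀ (l : List (Int × Int)) (s : PySem.Set (Int × Int)), x ∈ s → x ∈ PySem.Set.update s l := by
  intro l
  induction l with
  | nil => intro s h; exact h
  | cons a rest ih =>
    intro s h
    have : x ∈ PySem.Set.add s a := by
      simp only [PySem.Set.add]
      split
      · exact h
      · exact List.mem_append_left _ h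
    exact ih _ this

-- pvFS is preserved by a batch of fresh insertions
theorem pvFS_pvIns (start pos : Int × Int) :
    ∀ (fr : List (Int × Int)) (d : PySem.Dict (Int × Int) (Option (Int × Int))),
      fr.Nodup → (∀ np ∈ fr, d.contains np = false) →
      ∀ {p : (Int × Int)} {f : Option (Int × Int)}, pvFS start d p f →
        pvFS start (pvIns pos d fr) p f := by
  intro fr
  induction fr with
  | nil => intro d _ _ p f h; exact h
  | cons np rest ih =>
    intro d hnd hfresh p f h
    have hk : d.contains np = false := hfresh np (List.mem_cons_self ..)
    refine ih (d.insert np (some pos)) hnd.of_cons ?_ (pvFS_insert start d np (some pos) hk h)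
    intro a ha
    have hne : a ≠ np := by
      intro he; subst he; exact (List.nodup_cons.mp hnd).1 ha
    rw [pvContains_insert_ne _ _ _ _ hne]
    exact hfresh a (List.mem_cons_of_mem _ ha)

-- each freshly discovered cell gets B's first-step value, w.r.t. the batched dict
theorem pvFS_new (start pos : Int × Int) (first : Option (Int × Int)) :
    ∀ (fr : List (Int × Int)) (d : PySem.Dict (Int × Int) (Option (Int × Int))),
      fr.Nodup → (∀ np ∈ fr, d.contains np = false) → start ∈ d.keys →
      pvFS start d pos first →
      ∀ np ∈ fr, pvFS start (pvIns pos d fr) np (some (first.getD np)) := by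
  intro fr
  induction fr with
  | nil => intro d _ _ _ _ np h; simp at h
  | cons a rest ih =>
    intro d hnd hfresh hstart hFS np hmem
    have hka : d.contains a = false := hfresh a (List.mem_cons_self ..)
    have hfresh' : ∀ b ∈ rest, (d.insert a (some pos)).contains b = false := by
      intro b hb
      have hne : b ≠ a := by
        intro he; subst he; exact (List.nodup_cons.mp hnd).1 hb
      rw [pvContains_insert_ne _ _ _ _ hne]
      exact hfresh b (List.mem_cons_of_mem _ hb)
    have hstep : pvIns pos d (a :: rest) = pvIns pos (d.insert a (some pos)) rest := rfl
    rcases List.mem_cons.mp hmem with rfl | hmem'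
    · -- the head: established by its own insert, preserved by the rest
      have hwalk := pvWalkA_new start pos np d hka hFS
      have hbase : pvFS start (d.insert np (some pos)) np (some (first.getD np)) := by
        refine Or.inr ⟨?_, _, rfl, hwalk⟩
        intro he; subst he
        exact absurd hstart (by intro hm; simp [← PySem.Dict.contains_iff_mem_keys, hka] at hm)
      rw [hstep]
      exact pvFS_pvIns start pos rest _ hnd.of_cons hfresh' hbase
    · -- a later element: induction on the rest
      rw [hstep]
      exact ih (d.insert a (some pos)) hnd.of_cons hfresh'
        (by rw [PySem.Dict.keys_insert_of_not_contains _ _ hka]; exact List.mem_append_left _ hstart)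
        (pvFS_insert start d a (some pos) hka hFS) np hmem'

-- Source B's inlined neighbor tuples are A's offsets applied to pos
theorem pvNbrs_eq (pos : Int × Int) :
    pvNbrs pos = pvDirs.map (fun a => ((pos.1 + a.1, pos.2 + a.2) : Int × Int)) := by
  simp [pvNbrs, pvDirs, Prod.ext_iff]
  try omega

-- the four neighbors of a cell are pairwise distinct
theorem pvNbrs_nodup (pos : Int × Int) :
    (pvDirs.map (fun a => ((pos.1 + a.1, pos.2 + a.2) : Int × Int))).Nodup := by
  simp [pvDirs, Prod.ext_iff]
  try omega

-- A's inner dir-loop, described as B computes it: filter once, test goal, batch-insert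
theorem pvTryA_desc (goal : Int × Int) (blocked : List (Int × Int)) (w h_ : Int)
    (start pos : Int × Int) (first : Option (Int × Int)) :
    ∀ (dirs : List (Int × Int)) (q : List (Int × Int))
      (d : PySem.Dict (Int × Int) (Option (Int × Int))) (vis : PySem.Set (Int × Int)),
      (dirs.map (fun a => ((pos.1 + a.1, pos.2 + a.2) : Int × Int))).Nodup →
      (∀ a ∈ dirs, d.contains (pos.1 + a.1, pos.2 + a.2)
          = PySem.Set.contains vis (pos.1 + a.1, pos.2 + a.2)) →
      pvFS start d pos first →
      pvTryA goal blocked w h_ start pos dirs q d =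
        (let fr := (dirs.map (fun a => ((pos.1 + a.1, pos.2 + a.2) : Int × Int))).filter
            (pvKeep vis blocked w h_);
         if goal ∈ fr then Sum.inl (some (first.getD goal))
         else Sum.inr (q ++ fr, pvIns pos d fr)) := by
  intro dirs
  induction dirs with
  | nil => intro q d vis _ _ _; simp [pvTryA, pvIns]
  | cons a rest ih =>
    intro q d vis hnd hag hFS
    obtain ⟨dx, dy⟩ := a
    rw [List.map_cons] at hnd
    have hagh := hag (dx, dy) (List.mem_cons_self ..)
    simp only [pvTryA, List.map_cons]
    by_cases h1 : d.contains (pos.1 + dx, pos.2 + dy)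
    · -- already visited: dropped on both sides
      have hv : PySem.Set.contains vis (pos.1 + dx, pos.2 + dy) = true := by
        rw [← hagh]; exact h1
      have hmem : ((pos.1 + dx, pos.2 + dy) : Int × Int) ∈ vis := by simpa using hv
      have hkeep : pvKeep vis blocked w h_ (pos.1 + dx, pos.2 + dy) = false := by
        simp [pvKeep, hmem]
      simp only [h1, if_true, List.filter_cons, hkeep, Bool.false_eq_true, if_false]
      exact ih q d vis (List.nodup_cons.mp hnd).2
        (fun b hb => hag b (List.mem_cons_of_mem _ hb)) hFS
    · simp only [h1, Bool.false_eq_true, if_false]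
      by_cases h2 : ¬ (0 ≤ pos.1 + dx ∧ pos.1 + dx < w ∧ 0 ≤ pos.2 + dy ∧ pos.2 + dy < h_)
      · have hb2 : decide (0 ≤ pos.1 + dx ∧ pos.1 + dx < w ∧ 0 ≤ pos.2 + dy ∧ pos.2 + dy < h_)
            = false := decide_eq_false h2
        have hkeep : pvKeep vis blocked w h_ (pos.1 + dx, pos.2 + dy) = false := by
          simp [pvKeep, hb2]
        simp only [h2, List.filter_cons, hkeep, Bool.false_eq_true, if_false]
        exact ih q d vis (List.nodup_cons.mp hnd).2
          (fun b hb => hag b (List.mem_cons_of_mem _ hb)) hFS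
      · simp only [h2, if_false]
        by_cases h3 : (pos.1 + dx, pos.2 + dy) ∈ blocked
        · have hkeep : pvKeep vis blocked w h_ (pos.1 + dx, pos.2 + dy) = false := by
            simp [pvKeep, h3]
          simp only [h3, if_true, List.filter_cons, hkeep, Bool.false_eq_true, if_false]
          exact ih q d vis (List.nodup_cons.mp hnd).2
            (fun b hb => hag b (List.mem_cons_of_mem _ hb)) hFS
        · -- accepted
          have hv : PySem.Set.contains vis (pos.1 + dx, pos.2 + dy) = false := by
            rw [← hagh]; simpa using h1
          have hb2 : decide (0 ≤ pos.1 + dx ∧ pos.1 + dx < w ∧ 0 ≤ pos.2 + dy ∧ pos.2 + dy < h_)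
              = true := decide_eq_true (not_not.mp h2)
          have hb3 : decide ((pos.1 + dx, pos.2 + dy) ∈ blocked) = false := decide_eq_false h3
          have hnm : ((pos.1 + dx, pos.2 + dy) : Int × Int) ∉ vis := by simpa using hv
          have hkeep : pvKeep vis blocked w h_ (pos.1 + dx, pos.2 + dy) = true := by
            simp [pvKeep, hnm, hb2, hb3]
          have hkf : d.contains (pos.1 + dx, pos.2 + dy) = false := by simpa using h1
          simp only [h3, if_false, List.filter_cons, hkeep, if_true]
          by_cases h4 : (pos.1 + dx, pos.2 + dy) = goal
          · simp only [h4, if_true]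
            have := pvWalkA_new start pos goal d (h4 ▸ hkf) hFS
            simp [List.mem_cons, this]
          · simp only [h4, if_false]
            have hag' : ∀ b ∈ rest,
                (d.insert (pos.1 + dx, pos.2 + dy) (some pos)).contains (pos.1 + b.1, pos.2 + b.2)
                  = PySem.Set.contains vis (pos.1 + b.1, pos.2 + b.2) := by
              intro b hb
              have hne : ((pos.1 + b.1, pos.2 + b.2) : Int × Int) ≠ (pos.1 + dx, pos.2 + dy) := by
                intro he
                have hm : ((pos.1 + b.1, pos.2 + b.2) : Int × Int)
                    ∈ rest.map (fun a => ((pos.1 + a.1, pos.2 + a.2) : Int × Int)) :=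
                  List.mem_map.mpr ⟨b, hb, rfl⟩
                rw [he] at hm
                exact (List.nodup_cons.mp hnd).1 hm
              rw [pvContains_insert_ne _ _ _ _ hne]
              exact hag b (List.mem_cons_of_mem _ hb)
            have hFS' := pvFS_insert start d _ (some pos) hkf hFS
            rw [ih (q ++ [(pos.1 + dx, pos.2 + dy)]) _ vis (List.nodup_cons.mp hnd).2 hag' hFS']
            have hng : goal ≠ ((pos.1 + dx, pos.2 + dy) : Int × Int) := fun h => h4 h.symm
            by_cases h5 : goal ∈ (rest.map (fun a => ((pos.1 + a.1, pos.2 + a.2) : Int × Int))).filter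
                (pvKeep vis blocked w h_)
            · simp [h5, List.mem_cons]
            · have h6 : goal ∉ ((pos.1 + dx, pos.2 + dy) ::
                  (rest.map (fun a => ((pos.1 + a.1, pos.2 + a.2) : Int × Int))).filter
                    (pvKeep vis blocked w h_)) := by
                simp [List.mem_cons, h5, hng]
              simp only [h5, if_false]
              rw [if_neg h6]
              simp [pvIns, List.append_assoc]

-- the two loops, coupled
theorem pvLoop_couple (goal : Int × Int) (blocked : List (Int × Int)) (w h_ : Int)
    (start : Int × Int) :
    ∀ (n : Nat) (qB : List ((Int × Int) × Option (Int × Int)))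
      (d : PySem.Dict (Int × Int) (Option (Int × Int))),
      start ∈ d.keys → (∀ pf ∈ qB, pvFS start d pf.1 pf.2) →
      pvLoopA goal blocked w h_ start n (qB.map Prod.fst) d
        = pvLoopB goal blocked w h_ n qB d.keys := by
  intro n
  induction n with
  | zero => intro qB d _ _; rfl
  | succ m ih =>
    intro qB d hstart hq
    cases qB with
    | nil => rfl
    | cons pf rest =>
      obtain ⟨pos, first⟩ := pf
      rw [List.map_cons]
      simp only [pvLoopA, pvLoopB]
      have hag : ∀ a ∈ pvDirs, d.contains (pos.1 + a.1, pos.2 + a.2)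
          = PySem.Set.contains d.keys (pos.1 + a.1, pos.2 + a.2) := by
        intro a _
        simp [PySem.Set.contains, PySem.Dict.contains_eq_decide_mem_keys]
      rw [pvTryA_desc goal blocked w h_ start pos first pvDirs (rest.map Prod.fst) d d.keys
        (pvNbrs_nodup pos) hag (hq _ (List.mem_cons_self ..))]
      rw [← pvNbrs_eq pos]
      set fr := (pvNbrs pos).filter (pvKeep d.keys blocked w h_) with hfr
      have hfrnd : fr.Nodup := by
        rw [hfr, pvNbrs_eq]; exact (pvNbrs_nodup pos).filter _
      have hfresh : ∀ np ∈ fr, d.contains np = false := by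
        intro np hnp
        have hkp := (List.mem_filter.mp hnp).2
        simp [pvKeep] at hkp
        simp [PySem.Dict.contains_eq_decide_mem_keys, hkp.1]
      by_cases hg : goal ∈ fr
      · simp [hg]
      · simp only [hg, if_false]
        have hkeys := pvKeys_pvIns pos fr d hfrnd hfresh
        have hstart' : start ∈ (pvIns pos d fr).keys := by
          rw [hkeys]; exact pvMem_update start fr d.keys hstart
        have hq' : ∀ pf ∈ rest ++ fr.map (fun np => (np, some (first.getD np))),
            pvFS start (pvIns pos d fr) pf.1 pf.2 := by
          intro pf hpf
          rcases List.mem_append.mp hpf with hm | hm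
          · exact pvFS_pvIns start pos fr d hfrnd hfresh (hq pf (List.mem_cons_of_mem _ hm))
          · obtain ⟨np, hnp, rfl⟩ := List.mem_map.mp hm
            exact pvFS_new start pos first fr d hfrnd hfresh hstart
              (hq _ (List.mem_cons_self ..)) np hnp
        have := ih (rest ++ fr.map (fun np => (np, some (first.getD np)))) (pvIns pos d fr)
          hstart' hq'
        rw [← hkeys]
        rw [← this]
        simp [Function.comp_def]

-- ===== VERDICT (by name: the statement is the Claim_ definition above) =====
theorem bfs_next_step_spec : Claim_equal_bfs_next_step := by
  intro start goal blocked w h_ _ _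
  unfold Spec_bfs_next_step bfs_next_step bfs_next_step_alt
  by_cases h : start = goal
  · simp [h]
  · simp only [h, if_false]
    have hkeys : (PySem.Dict.empty.insert start (none : Option (Int × Int))).keys = [start] := by
      rw [PySem.Dict.keys_insert_of_not_contains _ _ (by simp)]
      simp
    have := pvLoop_couple goal blocked w h_ start (w.toNat * h_.toNat + 2)
      [(start, none)] (PySem.Dict.empty.insert start none)
      (by rw [hkeys]; exact List.mem_singleton.mpr rfl)
      (by intro pf hpf; rcases List.mem_singleton.mp hpf with rfl; exact Or.inl ⟨rfl, rfl⟩)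
    rw [hkeys] at this
    simpa [PySem.Set.ofList] using this
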